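-- pv_equiv track=rewrite | github.com/pypi-data/pypi-mirror-375 | packages/abstract-utilities/abstract_utilities-0.2.2.375.tar.gz/abstract_utilities-0.2.2.375/src/abstract_utilities/parse_utils.py | get_code_blocks
-- ===== SOURCE A (Python) =====
-- def get_code_blocks(data,indent_level=0):
--     blocks = [[]]
--     def get_blocks(data,delim):
--         if delim == None:
--             if isinstance(data,str):
--                 data = list(data)
--             delim = ''
--         else:
--             data = data.split(delim)
--         return data,delim
--     lines,delim = get_blocks(data,'\n')
--     for line in lines:
--         beggining=''
--         for char in line:
--             if char in ['',' ','\n','\t']: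
--                 beggining +=char
--             else:
--                 break
--         if len(beggining) == indent_level:
--             blocks[-1]=(delim).join(blocks[-1])
--             blocks.append([line])
--         else:
--             blocks[-1].append(line)
--     blocks[-1]=(delim).join(blocks[-1])
--     return blocks,delim
-- ===== SOURCE B (Python) =====
-- def _indent(line):
--     n = 0
--     while n < len(line) and line[n] in (' ', '\t', '\n'):
--         n += 1
--     return n
--
-- def get_code_blocks(data, indent_level=0):
--     lines = data.split('\n')
--     cuts = [0] + [i for i, line in enumerate(lines) if _indent(line) == indent_level] + [len(lines)]
--     return ['\n'.join(lines[c:d]) for c, d in zip(cuts, cuts[1:])], '\n'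
-- ===== Notes on version B (the rewrite author's own statement) =====
-- stated objective: alternative
-- what changed: Replaces A's incremental finalize-and-start-new-block accumulator (mutating the last element of a growing blocks list) by first computing the list of boundary line indices, then producing each block as a join of a slice between consecutive cut points.
import Mathlib
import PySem

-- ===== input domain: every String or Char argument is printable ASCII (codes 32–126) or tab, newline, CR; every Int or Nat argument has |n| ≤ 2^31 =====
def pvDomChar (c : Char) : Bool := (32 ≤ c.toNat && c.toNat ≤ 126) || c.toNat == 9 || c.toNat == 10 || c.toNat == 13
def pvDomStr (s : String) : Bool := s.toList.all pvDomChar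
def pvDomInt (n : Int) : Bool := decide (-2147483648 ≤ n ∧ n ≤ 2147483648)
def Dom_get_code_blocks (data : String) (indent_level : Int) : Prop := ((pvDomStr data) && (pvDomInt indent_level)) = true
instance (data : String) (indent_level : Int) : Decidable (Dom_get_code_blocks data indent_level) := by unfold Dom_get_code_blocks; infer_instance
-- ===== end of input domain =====

-- B replaces A's incremental finalize-and-start-new-block accumulator by computing the
-- boundary indices first and slicing the line list at consecutive cut points (alternative
-- decomposition, same cost).

-- ===== PORT A =====
-- inner loop building `beggining`: `char in ['',' ','\n','\t']` — char is a single
-- character, so '' never matches; exact as the three-character test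
def begA : List Char → List Char
  | [] => []
  | c :: cs => if c == ' ' || c == '\n' || c == '\t' then c :: begA cs else []

-- the `for line in lines` loop; blocks is (finalized strings, current block's lines)
def goA (indent_level : Int) : List String → List String → List String → List String
  | [], done, cur => done ++ [PySem.Str.join "\n" cur]
  | l :: ls, done, cur =>
    if ((begA l.toList).length : Int) == indent_level then
      goA indent_level ls (done ++ [PySem.Str.join "\n" cur]) [l]
    else
      goA indent_level ls done (cur ++ [l])

def get_code_blocks (data : String) (indent_level : Int) : List String × String :=
  let lines := (PySem.Str.split? data "\n").getD []   -- data.split('\n'); sep ≠ "" so split? is always some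
  (goA indent_level lines [] [], "\n")

-- ===== PORT B =====
-- Source B's _indent: while n < len(line) and line[n] in (' ', '\t', '\n'): n += 1
def indLen : List Char → Nat
  | [] => 0
  | c :: cs => if c == ' ' || c == '\t' || c == '\n' then indLen cs + 1 else 0

def get_code_blocks_alt (data : String) (indent_level : Int) : List String × String :=
  let lines := (PySem.Str.split? data "\n").getD []   -- data.split('\n'); sep ≠ "" so split? is always some
  let cuts : List Int :=
    0 :: ((PySem.List.enumerate lines).filter
            (fun p => ((indLen p.2.toList : Int) == indent_level))).map Prod.fst
      ++ [(lines.length : Int)]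
  ((cuts.zip cuts.tail).map
      (fun p => PySem.Str.join "\n" (PySem.List.slice lines (some p.1) (some p.2))), "\n")

-- ===== PRECONDITION & SPEC =====
def Spec_get_code_blocks (data : String) (indent_level : Int) (out : List String × String) : Prop := out = get_code_blocks_alt data indent_level
instance (data : String) (indent_level : Int) (out : List String × String) : Decidable (Spec_get_code_blocks data indent_level out) := by unfold Spec_get_code_blocks; infer_instance

-- ===== CLAIM (what is proved, stated in full; the proofs are below) =====
def Claim_equal_get_code_blocks : Prop := ∀ (data : String) (indent_level : Int), Dom_get_code_blocks data indent_level → Spec_get_code_blocks data indent_level (get_code_blocks data indent_level)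

-- ===== LEMMAS AND PROOFS =====

-- is this line a block boundary?
def isB (k : Int) (l : String) : Bool := ((indLen l.toList : Int) == k)

-- boundary indices of a line list
def natBnds (k : Int) : List String → List Nat
  | [] => []
  | l :: ls => if isB k l then 0 :: (natBnds k ls).map (· + 1) else (natBnds k ls).map (· + 1)

-- the grouping both programs compute, as lists of lines
def chunks (k : Int) (pre : List String) : List String → List (List String)
  | [] => [pre]
  | l :: ls => if isB k l then pre :: chunks k [l] ls else chunks k (pre ++ [l]) ls

def sl (ls : List String) (p : Nat × Nat) : List String := (ls.drop p.1).take (p.2 - p.1)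

def zc (cs : List Nat) : List (Nat × Nat) := cs.zip cs.tail

theorem begA_len (cs : List Char) : (begA cs).length = indLen cs := by
  induction cs with
  | nil => rfl
  | cons c cs ih =>
    by_cases h : (c == ' ' || c == '\n' || c == '\t') = true
    · have h' : (c == ' ' || c == '\t' || c == '\n') = true := by
        rcases Bool.or_eq_true_iff.1 h with h | h
        · rcases Bool.or_eq_true_iff.1 h with h | h <;> simp [h]
        · simp [h]
      simp [begA, indLen, h, h', ih]
    · have h' : ¬ (c == ' ' || c == '\t' || c == '\n') = true := by
        intro hc; apply h
        rcases Bool.or_eq_true_iff.1 hc with hc | hc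
        · rcases Bool.or_eq_true_iff.1 hc with hc | hc <;> simp [hc]
        · simp [hc]
      simp [begA, indLen, h, h']

theorem goA_eq (k : Int) (ls : List String) : ∀ done cur,
    goA k ls done cur = done ++ (chunks k cur ls).map (PySem.Str.join "\n") := by
  induction ls with
  | nil => intro done cur; simp [goA, chunks]
  | cons l ls ih =>
    intro done cur
    by_cases h : isB k l = true
    · have hb : (((begA l.toList).length : Int) == k) = true := by
        simpa [isB, begA_len] using h
      simp [goA, chunks, hb, h, ih]
    · have hb : ¬ (((begA l.toList).length : Int) == k) = true := by
        simpa [isB, begA_len] using h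
      simp [goA, chunks, hb, h, ih]

-- chunks with a non-empty prefix = chunks from scratch with the prefix glued onto the head
theorem chunks_pre (k : Int) (ls : List String) : ∀ pre, ∃ h r,
    chunks k [] ls = h :: r ∧ chunks k pre ls = (pre ++ h) :: r := by
  induction ls with
  | nil => intro pre; exact ⟨[], [], rfl, by simp [chunks]⟩
  | cons l ls ih =>
    intro pre
    by_cases hb : isB k l = true
    · exact ⟨[], chunks k [l] ls, by simp [chunks, hb], by simp [chunks, hb]⟩
    · obtain ⟨h, r, h1, h2⟩ := ih [l]
      obtain ⟨h', r', h1', h2'⟩ := ih (pre ++ [l])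
      have hinj := h1.symm.trans h1'
      injection hinj with e1 e2
      subst e1; subst e2
      refine ⟨[l] ++ h, r, by simp [chunks, hb, h2], ?_⟩
      simp [chunks, hb, h2', List.append_assoc]

theorem zc_map_succ (cs : List Nat) :
    zc (cs.map (· + 1)) = (zc cs).map (Prod.map (· + 1) (· + 1)) := by
  simp [zc, ← List.map_tail, List.zip_map]

theorem sl_succ (l : String) (t : List String) (p : Nat × Nat) :
    sl (l :: t) (p.1 + 1, p.2 + 1) = sl t p := by
  simp [sl]

theorem map_sl_shift (l : String) (t : List String) (ps : List (Nat × Nat)) :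
    (ps.map (Prod.map (· + 1) (· + 1))).map (sl (l :: t)) = ps.map (sl t) := by
  rw [List.map_map]
  refine List.map_congr_left (fun p _ => ?_)
  simpa using sl_succ l t p

theorem main_slices (k : Int) (ls : List String) :
    (zc (0 :: natBnds k ls ++ [ls.length])).map (sl ls) = chunks k [] ls := by
  induction ls with
  | nil => simp [natBnds, zc, sl, chunks]
  | cons l t ih =>
    obtain ⟨c, cr, hc⟩ : ∃ c cr, natBnds k t ++ [t.length] = c :: cr := by
      cases hB : natBnds k t with
      | nil => exact ⟨t.length, [], by simp⟩
      | cons a b => exact ⟨a, b ++ [t.length], by simp⟩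
    obtain ⟨h, r, hch, _⟩ := chunks_pre k t []
    have hzc0 : zc (0 :: natBnds k t ++ [t.length]) = (0, c) :: zc (c :: cr) := by
      rw [List.cons_append, hc]; rfl
    rw [hzc0, hch] at ih
    simp only [List.map_cons] at ih
    injection ih with hhead htail
    have hmap1 : (natBnds k t).map (· + 1) ++ [t.length + 1]
        = (natBnds k t ++ [t.length]).map (· + 1) := by simp
    by_cases hb : isB k l = true
    · -- cuts: 0 :: 0 :: (c+1) :: map (+1) cr
      have hcuts : (0 :: natBnds k (l :: t) ++ [(l :: t).length])
          = 0 :: 0 :: ((c + 1) :: cr.map (· + 1)) := by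
        simp only [natBnds, hb, if_pos, List.length_cons]
        simp [hmap1, hc]
      rw [hcuts]
      have hzc : zc (0 :: 0 :: ((c + 1) :: cr.map (· + 1)))
          = (0, 0) :: (0, c + 1) :: zc ((c + 1) :: cr.map (· + 1)) := rfl
      have hzc2 : zc ((c + 1) :: cr.map (· + 1)) = zc ((c :: cr).map (· + 1)) := by simp
      rw [hzc, hzc2, zc_map_succ]
      obtain ⟨h2, r2, hch2, hpre2⟩ := chunks_pre k t [l]
      rw [hch] at hch2
      obtain ⟨rfl, rfl⟩ : h2 = h ∧ r2 = r :=
        ⟨(List.cons.injEq _ _ _ _ ▸ hch2).1.symm, (List.cons.injEq _ _ _ _ ▸ hch2).2.symm⟩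
      simp only [List.map_cons, map_sl_shift, htail]
      have hsl00 : sl (l :: t) (0, 0) = [] := by simp [sl]
      have hslc : sl (l :: t) (0, c + 1) = l :: sl t (0, c) := by simp [sl]
      rw [hsl00, hslc, hhead]
      simp [chunks, hb, hpre2]
    · have hcuts : (0 :: natBnds k (l :: t) ++ [(l :: t).length])
          = 0 :: ((c + 1) :: cr.map (· + 1)) := by
        simp only [natBnds, hb, List.length_cons]
        simp [hmap1, hc]
      rw [hcuts]
      have hzc : zc (0 :: ((c + 1) :: cr.map (· + 1)))
          = (0, c + 1) :: zc ((c + 1) :: cr.map (· + 1)) := rfl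
      have hzc2 : zc ((c + 1) :: cr.map (· + 1)) = zc ((c :: cr).map (· + 1)) := by simp
      rw [hzc, hzc2, zc_map_succ]
      obtain ⟨h2, r2, hch2, hpre2⟩ := chunks_pre k t [l]
      rw [hch] at hch2
      obtain ⟨rfl, rfl⟩ : h2 = h ∧ r2 = r :=
        ⟨(List.cons.injEq _ _ _ _ ▸ hch2).1.symm, (List.cons.injEq _ _ _ _ ▸ hch2).2.symm⟩
      simp only [List.map_cons, map_sl_shift, htail]
      have hslc : sl (l :: t) (0, c + 1) = l :: sl t (0, c) := by simp [sl]
      rw [hslc, hhead]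
      simp [chunks, hb, hpre2]

-- the enumerate/filter pass computes exactly natBnds, shifted by the start index
theorem enum_bnds (k : Int) (ls : List String) : ∀ i : Nat,
    ((PySem.List.enumerate ls (i : Int)).filter
        (fun p => ((indLen p.2.toList : Int) == k))).map Prod.fst
      = (natBnds k ls).map (fun n : Nat => ((i + n : Nat) : Int)) := by
  induction ls with
  | nil => intro i; simp [PySem.List.enumerate, natBnds]
  | cons l ls ih =>
    intro i
    rw [PySem.List.enumerate_cons]
    have hstep : ((i : Int) + 1) = ((i + 1 : Nat) : Int) := by push_cast; ring
    by_cases hb : isB k l = true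
    · have hb' : ((indLen l.toList : Int) == k) = true := hb
      simp only [List.filter_cons, hb', if_pos, List.map_cons, natBnds, hb]
      rw [hstep, ih (i + 1)]
      simp only [List.map_map]
      refine congrArg₂ List.cons (by simp) (List.map_congr_left fun n _ => ?_)
      simp only [Function.comp_apply]
      exact congrArg _ (by omega)
    · have hb' : ¬ ((indLen l.toList : Int) == k) = true := hb
      simp only [List.filter_cons, hb', if_neg, natBnds, hb, if_neg, Bool.not_eq_true]
      rw [hstep, ih (i + 1)]
      rw [List.map_map]
      refine List.map_congr_left (fun n _ => ?_)
      simp only [Function.comp_apply]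
      exact congrArg _ (by omega)

-- ===== VERDICT (by name: the statement is the Claim_ definition above) =====
theorem get_code_blocks_spec : Claim_equal_get_code_blocks := by
  intro data k _
  unfold Spec_get_code_blocks get_code_blocks get_code_blocks_alt
  set lines := (PySem.Str.split? data "\n").getD [] with hl
  have hA : goA k lines [] [] = (chunks k [] lines).map (PySem.Str.join "\n") := by
    simpa using goA_eq k lines [] []
  have hcuts : (0 :: ((PySem.List.enumerate lines).filter
            (fun p => ((indLen p.2.toList : Int) == k))).map Prod.fst
        ++ [(lines.length : Int)])
      = (0 :: natBnds k lines ++ [lines.length]).map (fun n : Nat => (n : Int)) := by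
    have := enum_bnds k lines 0
    simp only [Nat.cast_zero] at this
    rw [this]
    simp
  have hzip : ∀ (cs : List Nat),
      ((cs.map (fun n : Nat => (n : Int))).zip (cs.map (fun n : Nat => (n : Int))).tail)
        = (cs.zip cs.tail).map (Prod.map (fun n : Nat => (n : Int)) (fun n : Nat => (n : Int))) := by
    intro cs; rw [← List.map_tail, List.zip_map]
  refine Prod.ext ?_ rfl
  simp only
  rw [hA, hcuts, hzip]
  rw [← main_slices k lines]
  rw [List.map_map, List.map_map]
  refine List.map_congr_left (fun p _ => ?_)
  simp only [Function.comp_apply, Prod.map_fst, Prod.map_snd]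
  rw [PySem.List.slice_natCast]
  rfl
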